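-- pv_equiv track=rewrite | github.com/Ti765/gclick | diagnostico_datas.py | collect_date_stats
-- ===== SOURCE A (Python) =====
-- from collections import Counter
--
-- def collect_date_stats(tasks):
--     fields = ["dataVencimento", "dataMeta", "dataAcao", "dataConclusao"]
--     presence = {f: 0 for f in fields}
--     distinct = {f: Counter() for f in fields}
--     for t in tasks:
--         for f in fields:
--             val = t.get(f)
--             if val:
--                 presence[f] += 1
--                 distinct[f][val] += 1
--     return presence, distinct
-- ===== SOURCE B (Python) =====
-- from collections import Counter
--
-- def collect_date_stats(tasks):
--     fields = ["dataVencimento", "dataMeta", "dataAcao", "dataConclusao"]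
--     distinct = {f: Counter(v for t in tasks for v in [t.get(f)] if v) for f in fields}
--     presence = {f: sum(c.values()) for f, c in distinct.items()}
--     return presence, distinct
-- ===== Notes on version B (the rewrite author's own statement) =====
-- stated objective: simpler
-- what changed: Instead of one task loop incrementing presence and distinct side by side, B builds each field's Counter directly from a per-field comprehension over the tasks and then derives presence as the sum of that Counter's values.
import Mathlib
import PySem

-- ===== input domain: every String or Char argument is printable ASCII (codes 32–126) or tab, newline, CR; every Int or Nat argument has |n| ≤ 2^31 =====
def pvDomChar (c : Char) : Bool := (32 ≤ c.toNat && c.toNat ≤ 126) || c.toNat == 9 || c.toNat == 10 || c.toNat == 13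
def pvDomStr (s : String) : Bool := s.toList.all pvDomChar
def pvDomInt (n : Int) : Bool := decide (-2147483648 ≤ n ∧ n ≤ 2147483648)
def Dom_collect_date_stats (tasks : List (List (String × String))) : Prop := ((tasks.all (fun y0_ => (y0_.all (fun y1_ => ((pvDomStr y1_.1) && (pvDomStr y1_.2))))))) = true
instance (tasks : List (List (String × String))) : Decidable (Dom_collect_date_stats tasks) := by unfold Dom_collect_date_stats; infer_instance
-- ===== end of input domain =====

-- B builds each field's Counter by a per-field comprehension over tasks and derives presence
-- as the sum of the Counter's values, instead of A's single task loop maintaining both dicts.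

-- ===== PORT A =====
def pvFields : List String := ["dataVencimento", "dataMeta", "dataAcao", "dataConclusao"]

-- one task's inner 'for f in fields' loop body of A
def pvStepA (st : PySem.Dict String Int × PySem.Dict String (PySem.Dict String Int))
    (t : List (String × String)) :
    PySem.Dict String Int × PySem.Dict String (PySem.Dict String Int) :=
  pvFields.foldl (fun st f =>
    match (PySem.Dict.mk t).get? f with
    | some val =>
        if val ≠ "" then
          (st.1.modify f 0 (· + 1),
           st.2.modify f .empty (fun c => c.modify val 0 (· + 1)))
        else st
    | none => st) st

def collect_date_stats (tasks : List (List (String × String))) :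
    (List (String × Int)) × (List (String × List (String × Int))) :=
  let presence : PySem.Dict String Int := pvFields.foldl (fun d f => d.insert f 0) .empty
  let distinct : PySem.Dict String (PySem.Dict String Int) :=
    pvFields.foldl (fun d f => d.insert f .empty) .empty
  let st := tasks.foldl pvStepA (presence, distinct)
  (st.1.items, st.2.items.map (fun p => (p.1, p.2.items)))

-- ===== PORT B =====
-- t.get(f) filtered by truthiness, as in B's generator 'v for t in tasks for v in [t.get(f)] if v'
def pvGetv (f : String) (t : List (String × String)) : Option String :=
  match (PySem.Dict.mk t).get? f with
  | some v => if v ≠ "" then some v else none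
  | none => none

def pvFieldsB : List String := ["dataVencimento", "dataMeta", "dataAcao", "dataConclusao"]

def collect_date_stats_alt (tasks : List (List (String × String))) :
    (List (String × Int)) × (List (String × List (String × Int))) :=
  let distinct : List (String × List (String × Int)) :=
    pvFieldsB.map (fun f => (f, (PySem.Dict.counter (tasks.filterMap (pvGetv f))).items))
  let presence : List (String × Int) := distinct.map (fun p => (p.1, (p.2.map (·.2)).sum))
  (presence, distinct)

-- ===== PRECONDITION & SPEC =====
def Spec_collect_date_stats (tasks : List (List (String × String))) (out : (List (String × Int)) × (List (String × List (String × Int)))) : Prop := out = collect_date_stats_alt tasks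
instance (tasks : List (List (String × String))) (out : (List (String × Int)) × (List (String × List (String × Int)))) : Decidable (Spec_collect_date_stats tasks out) := by unfold Spec_collect_date_stats; infer_instance

-- ===== CLAIM (what is proved, stated in full; the proofs are below) =====
def Claim_equal_collect_date_stats : Prop := ∀ (tasks : List (List (String × String))), Dom_collect_date_stats tasks → Spec_collect_date_stats tasks (collect_date_stats tasks)

-- ===== LEMMAS AND PROOFS =====

-- concrete shapes of A's state: presence/distinct dicts always have exactly the four field keys
def pvMkP (a b c d : Int) : PySem.Dict String Int :=
  ⟨[("dataVencimento", a), ("dataMeta", b), ("dataAcao", c), ("dataConclusao", d)]⟩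
def pvMkD (w x y z : PySem.Dict String Int) : PySem.Dict String (PySem.Dict String Int) :=
  ⟨[("dataVencimento", w), ("dataMeta", x), ("dataAcao", y), ("dataConclusao", z)]⟩

def pvInc (f : String) (t : List (String × String)) : Int :=
  match pvGetv f t with | some _ => 1 | none => 0

def pvUpd (f : String) (t : List (String × String)) (c : PySem.Dict String Int) :
    PySem.Dict String Int :=
  match pvGetv f t with | some v => c.modify v 0 (· + 1) | none => c

lemma pvStepA_eq (t : List (String × String)) (a b c d : Int)
    (w x y z : PySem.Dict String Int) :
    pvStepA (pvMkP a b c d, pvMkD w x y z) t =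
      (pvMkP (a + pvInc "dataVencimento" t) (b + pvInc "dataMeta" t)
             (c + pvInc "dataAcao" t) (d + pvInc "dataConclusao" t),
       pvMkD (pvUpd "dataVencimento" t w) (pvUpd "dataMeta" t x)
             (pvUpd "dataAcao" t y) (pvUpd "dataConclusao" t z)) := by
  simp only [pvStepA, pvFields, List.foldl, pvInc, pvUpd, pvGetv]
  cases h1 : (PySem.Dict.mk t).get? "dataVencimento" <;>
  cases h2 : (PySem.Dict.mk t).get? "dataMeta" <;>
  cases h3 : (PySem.Dict.mk t).get? "dataAcao" <;>
  cases h4 : (PySem.Dict.mk t).get? "dataConclusao"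
  all_goals dsimp only
  all_goals try split_ifs
  all_goals try simp only [add_zero]
  all_goals rfl

def pvCnt (f : String) (ts : List (List (String × String))) : Int :=
  ((ts.filterMap (pvGetv f)).length : Int)

def pvCtr (w : PySem.Dict String Int) (f : String) (ts : List (List (String × String))) :
    PySem.Dict String Int :=
  (ts.filterMap (pvGetv f)).foldl (fun c v => c.modify v 0 (· + 1)) w

lemma pvInc_cnt (f : String) (t : List (String × String))
    (ts : List (List (String × String))) :
    pvInc f t + pvCnt f ts = pvCnt f (t :: ts) := by
  simp only [pvInc, pvCnt, List.filterMap_cons]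
  cases pvGetv f t
  · simp
  · simp
    omega

lemma pvUpd_ctr (f : String) (t : List (String × String))
    (ts : List (List (String × String))) (w : PySem.Dict String Int) :
    pvCtr (pvUpd f t w) f ts = pvCtr w f (t :: ts) := by
  simp only [pvUpd, pvCtr, List.filterMap_cons]
  cases pvGetv f t <;> simp [List.foldl]

lemma pvFold_eq (ts : List (List (String × String))) (a b c d : Int)
    (w x y z : PySem.Dict String Int) :
    ts.foldl pvStepA (pvMkP a b c d, pvMkD w x y z) =
      (pvMkP (a + pvCnt "dataVencimento" ts) (b + pvCnt "dataMeta" ts)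
             (c + pvCnt "dataAcao" ts) (d + pvCnt "dataConclusao" ts),
       pvMkD (pvCtr w "dataVencimento" ts) (pvCtr x "dataMeta" ts)
             (pvCtr y "dataAcao" ts) (pvCtr z "dataConclusao" ts)) := by
  induction ts generalizing a b c d w x y z with
  | nil => simp [pvCnt, pvCtr]
  | cons t ts ih =>
      rw [List.foldl_cons, pvStepA_eq, ih]
      simp only [← pvInc_cnt, ← pvUpd_ctr]
      ring_nf

-- sum of a counter's values is the length of the counted list
lemma pvSum_counter (xs : List String) :
    (((PySem.Dict.counter xs : PySem.Dict String Int).items.map (·.2)).sum) = (xs.length : Int) := by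
  have hperm : (PySem.Set.ofList xs : List String).Perm xs.dedup := by
    apply List.perm_of_nodup_nodup_toFinset_eq (PySem.Set.nodup_ofList xs) xs.nodup_dedup
    ext v
    simp [PySem.Set.mem_ofList, List.mem_dedup]
  rw [PySem.Dict.items_counter, List.map_map]
  have hs : ((PySem.Set.ofList xs).map ((fun p => p.2) ∘ fun k => (k, (xs.count k : Int)))).sum
      = (xs.dedup.map ((fun p => p.2) ∘ fun k => ((k : String), (xs.count k : Int)))).sum :=
    (hperm.map _).sum_eq
  rw [hs, ← List.sum_map_count_dedup_eq_length xs, Nat.cast_list_sum, List.map_map]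
  rfl

-- ===== VERDICT (by name: the statement is the Claim_ definition above) =====
theorem collect_date_stats_spec : Claim_equal_collect_date_stats := by
  intro tasks _
  unfold Spec_collect_date_stats collect_date_stats collect_date_stats_alt
  have hinit : (pvFields.foldl (fun d f => d.insert f 0) .empty,
      pvFields.foldl (fun d f => d.insert f .empty) .empty) =
      ((pvMkP 0 0 0 0 : PySem.Dict String Int),
       (pvMkD .empty .empty .empty .empty : PySem.Dict String (PySem.Dict String Int))) := by
    decide
  have h := pvFold_eq tasks 0 0 0 0 .empty .empty .empty .empty
  simp only [hinit] at *
  rw [h]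
  simp only [pvMkP, pvMkD, pvFields, pvFieldsB, List.map_cons, List.map_nil, zero_add]
  refine Prod.ext ?_ rfl
  simp only [pvCnt, pvSum_counter]
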